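-- pv_equiv track=rewrite | github.com/daniel-reich/ubiquitous-fiesta | hY6BMxxEYycT83GPs_14.py | multiply_by_11
-- ===== SOURCE A (Python) =====
-- def multiply_by_11(n):
--   n = n[::-1]
--   ans = ''
--   carry = 0
--
--   for a,b in zip(n+'0','0'+n):
--     carry,nex = divmod(int(a)+int(b)+carry, 10)
--     ans+=str(nex)
--
--   if carry:
--     ans += '1'
--
--   return ans[::-1]
-- ===== SOURCE B (Python) =====
-- def multiply_by_11(n):
--   v = 0
--   for c in n:
--     v = v * 10 + int(c)
--   s = str(11 * v)
--   return '0' * (len(n) + 1 - len(s)) + s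
-- ===== Notes on version B (the rewrite author's own statement) =====
-- stated objective: alternative
-- what changed: A does schoolbook addition of n and 10*n digit by digit over the reversed string with a carry; B parses the whole string into one integer, multiplies it by 11, renders str(11*v) and left-pads with zeros to width len(n)+1, so there is no digit-pair/carry loop at all.
import Mathlib
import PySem

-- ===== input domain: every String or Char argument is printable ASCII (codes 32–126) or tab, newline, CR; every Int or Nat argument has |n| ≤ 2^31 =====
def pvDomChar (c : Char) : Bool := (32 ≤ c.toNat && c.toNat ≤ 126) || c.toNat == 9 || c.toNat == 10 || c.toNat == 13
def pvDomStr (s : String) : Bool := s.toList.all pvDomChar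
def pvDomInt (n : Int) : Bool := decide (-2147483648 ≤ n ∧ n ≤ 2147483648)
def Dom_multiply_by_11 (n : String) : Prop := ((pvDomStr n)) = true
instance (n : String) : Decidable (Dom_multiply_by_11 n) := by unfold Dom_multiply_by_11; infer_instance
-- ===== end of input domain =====

-- B replaces A's digit-pair schoolbook addition (reversed string, carry loop) by whole-number
-- arithmetic: parse n into an integer, multiply by 11, render and left-pad to width len(n)+1.


-- int(c) for a one-character string c (ValueError = none; Pre_ keeps it in the digit range)
def pvDigit (c : Char) : Int := (PySem.Int.ofStr? (String.ofList [c])).getD 0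

-- ===== PORT A =====
-- loop body of A: carry,nex = divmod(int(a)+int(b)+carry, 10); ans += str(nex)
def pvStepA (st : String × Int) (p : Char × Char) : String × Int :=
  let s := pvDigit p.1 + pvDigit p.2 + st.2
  (st.1 ++ PySem.Int.toStr (PySem.Int.mod s 10), PySem.Int.floordiv s 10)

def multiply_by_11 (n : String) : String :=
  let rev := ((PySem.Str.slice? n none none (-1)).getD "").toList     -- n = n[::-1]
  let r := (List.zip (rev ++ ['0']) ('0' :: rev)).foldl pvStepA ("", 0)
  let ans := if r.2 ≠ 0 then r.1 ++ "1" else r.1                      -- if carry: ans += '1'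
  (PySem.Str.slice? ans none none (-1)).getD ""                        -- return ans[::-1]

-- ===== PORT B =====
def multiply_by_11_alt (n : String) : String :=
  let v := n.toList.foldl (fun acc c => acc * 10 + pvDigit c) 0       -- for c in n: v = v*10 + int(c)
  let s := PySem.Int.toStr (11 * v)                                    -- s = str(11 * v)
  -- '0' * (len(n) + 1 - len(s)) + s   (Python's '0' * k is empty for k ≤ 0 = Nat subtraction)
  String.ofList (List.replicate (n.toList.length + 1 - s.toList.length) '0' ++ s.toList)

-- ===== PRECONDITION & SPEC =====
-- Pre_ excludes exactly the strings containing a non-digit character, on which Python A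
-- raises ValueError (int() of a single non-digit character); B raises there too.
def Pre_multiply_by_11 (n : String) : Prop := n.toList.all (fun c => c.isDigit) = true
instance (n : String) : Decidable (Pre_multiply_by_11 n) := by unfold Pre_multiply_by_11; infer_instance
def pvWitness_multiply_by_11 : String := "19"
def Spec_multiply_by_11 (n : String) (out : String) : Prop := out = multiply_by_11_alt n
instance (n : String) (out : String) : Decidable (Spec_multiply_by_11 n out) := by unfold Spec_multiply_by_11; infer_instance

-- ===== CLAIM (what is proved, stated in full; the proofs are below) =====
def Claim_equal_multiply_by_11 : Prop := ∀ (n : String), Dom_multiply_by_11 n → Pre_multiply_by_11 n → Spec_multiply_by_11 n (multiply_by_11 n)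

-- ===== LEMMAS AND PROOFS =====

-- the ten digit characters
lemma pv_digit_cases (c : Char) (h : c.isDigit = true) :
    c = '0' ∨ c = '1' ∨ c = '2' ∨ c = '3' ∨ c = '4' ∨ c = '5' ∨ c = '6' ∨ c = '7' ∨ c = '8' ∨ c = '9' := by
  simp [Char.isDigit] at h
  obtain ⟨h1, h2⟩ := h
  rw [UInt32.le_iff_toNat_le] at h1 h2
  have hv : c.toNat = 48 ∨ c.toNat = 49 ∨ c.toNat = 50 ∨ c.toNat = 51 ∨ c.toNat = 52 ∨ c.toNat = 53 ∨ c.toNat = 54 ∨ c.toNat = 55 ∨ c.toNat = 56 ∨ c.toNat = 57 := by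
    have hh : c.toNat = c.val.toNat := rfl
    simp [UInt32.toNat_ofNat] at h1 h2; omega
  have hc : c = Char.ofNat c.toNat := (Char.ofNat_toNat c).symm
  rcases hv with h|h|h|h|h|h|h|h|h|h <;> rw [h] at hc <;> simp [hc]

lemma pv_digit_bounds (c : Char) (h : c.isDigit = true) : 0 ≤ pvDigit c ∧ pvDigit c < 10 := by
  rcases pv_digit_cases c h with h|h|h|h|h|h|h|h|h|h <;> subst h <;> decide

-- str(d) for a single digit 0 ≤ d < 10
lemma pv_toStr_single (d : Int) (h0 : 0 ≤ d) (h1 : d < 10) :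
    (PySem.Int.toStr d).toList = [Nat.digitChar d.toNat] := by
  interval_cases d <;> decide

-- canonical decimal rendering of a Nat (big-endian, no leading zeros, 0 ↦ "0")
def pvRender (n : Nat) : List Char :=
  if _h : n < 10 then [Nat.digitChar n]
  else pvRender (n / 10) ++ [Nat.digitChar (n % 10)]
  decreasing_by exact Nat.div_lt_self (by omega) (by omega)

-- unfolding equations for pvRender
lemma pvRender_lt (n : Nat) (h : n < 10) : pvRender n = [Nat.digitChar n] := by
  rw [pvRender]; simp [h]

lemma pvRender_ge (n : Nat) (h : ¬ n < 10) :
    pvRender n = pvRender (n / 10) ++ [Nat.digitChar (n % 10)] := by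
  rw [pvRender]; simp [h]


lemma pv_toDigitsCore_append : ∀ (f n : Nat) (acc : List Char),
    Nat.toDigitsCore 10 f n acc = Nat.toDigitsCore 10 f n [] ++ acc := by
  intro f
  induction f with
  | zero => intro n acc; simp [Nat.toDigitsCore]
  | succ f ih =>
      intro n acc
      simp only [Nat.toDigitsCore]
      by_cases h : n / 10 = 0
      · simp [h]
      · simp only [h, if_false]
        rw [ih (n / 10) ((n % 10).digitChar :: acc), ih (n / 10) [(n % 10).digitChar]]
        simp

lemma pv_toDigitsCore_render : ∀ (f n : Nat), n < f →
    Nat.toDigitsCore 10 f n [] = pvRender n := by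
  intro f
  induction f with
  | zero => omega
  | succ f ih =>
      intro n hn
      simp only [Nat.toDigitsCore]
      by_cases h : n / 10 = 0
      · have h10 : n < 10 := by omega
        rw [pvRender_lt n h10]
        simp [h, Nat.mod_eq_of_lt h10]
      · have h10 : ¬ n < 10 := by omega
        have hlt : n / 10 < f := by
          have := Nat.div_lt_self (show 0 < n by omega) (show 1 < 10 by omega)
          omega
        rw [pvRender_ge n h10]
        simp only [h, if_false]
        rw [pv_toDigitsCore_append, ih (n / 10) hlt]

lemma pv_toStr_eq_render (m : Nat) : (PySem.Int.toStr (m : Int)).toList = pvRender m := by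
  rw [PySem.Int.toList_toStr]
  show PySem.Int.toChars (m : Int) = pvRender m
  simp only [PySem.Int.toChars]
  rw [if_neg (by omega)]
  show Nat.toDigitsCore 10 ((m : Int).toNat + 1) (m : Int).toNat [] = pvRender m
  rw [Int.toNat_natCast, pv_toDigitsCore_render (m + 1) m (by omega)]

-- little-endian value of a digit list
def pvVal : List Nat → Nat
  | [] => 0
  | d :: ds => d + 10 * pvVal ds

lemma pvVal_append (t : List Nat) (e : Nat) : pvVal (t ++ [e]) = pvVal t + e * 10 ^ t.length := by
  induction t with
  | nil => simp [pvVal]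
  | cons d t ih => simp [pvVal, ih, pow_succ]; ring

-- a little-endian digit list, reversed into characters, is the canonical rendering of its
-- value left-padded with '0' to the list's length
lemma pv_render_pad : ∀ (ds : List Nat), (∀ d ∈ ds, d < 10) → ds ≠ [] →
    (ds.map Nat.digitChar).reverse
      = List.replicate (ds.length - (pvRender (pvVal ds)).length) '0' ++ pvRender (pvVal ds) := by
  intro ds
  induction ds with
  | nil => intro _ h; exact absurd rfl h
  | cons d ds ih =>
      intro hlt _
      have hd : d < 10 := hlt d (by simp)
      by_cases hne : ds = []
      · subst hne
        simp [pvVal, pvRender_lt d hd]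
      · have ihh := ih (fun x hx => hlt x (by simp [hx])) hne
        have hlen : 1 ≤ ds.length := by
          cases ds with | nil => exact absurd rfl hne | cons _ _ => simp
        by_cases hv : pvVal ds = 0
        · -- all higher digits are zero
          have hrep : (List.map Nat.digitChar ds).reverse = List.replicate ds.length '0' := by
            rw [ihh, hv, pvRender_lt 0 (by omega), show Nat.digitChar 0 = '0' from rfl]
            rw [show ds.length = (ds.length - 1) + 1 by omega, List.replicate_succ']
            simp
          have hvv : pvVal (d :: ds) = d := by simp [pvVal, hv]
          rw [hvv, pvRender_lt d hd]
          simp only [List.map_cons, List.reverse_cons, hrep]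
          simp
        · -- pvRender (d + 10 * v) = pvRender v ++ [digitChar d]
          have hv1 : 1 ≤ pvVal ds := by omega
          have hvv : pvVal (d :: ds) = d + 10 * pvVal ds := rfl
          have hren : pvRender (d + 10 * pvVal ds) = pvRender (pvVal ds) ++ [Nat.digitChar d] := by
            rw [pvRender_ge _ (by omega)]
            have h1 : (d + 10 * pvVal ds) / 10 = pvVal ds := by omega
            have h2 : (d + 10 * pvVal ds) % 10 = d := by omega
            rw [h1, h2]
          rw [hvv, hren]
          have hc : ds.length + 1 - (pvRender (pvVal ds) ++ [Nat.digitChar d]).length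
              = ds.length - (pvRender (pvVal ds)).length := by
            simp only [List.length_append, List.length_singleton]
            omega
          simp only [List.map_cons, List.reverse_cons, ihh, List.length_cons, hc,
            List.append_assoc]

-- A's loop body as a function of the column sum
def pvStepCol (st : String × Int) (x : Int) : String × Int :=
  (st.1 ++ PySem.Int.toStr (PySem.Int.mod (x + st.2) 10), PySem.Int.floordiv (x + st.2) 10)

lemma pvStepA_eq_col : pvStepA = fun st p => pvStepCol st (pvDigit p.1 + pvDigit p.2) := by
  funext st p
  rfl

-- the digits and carry A's fold produces, computed directly
def pvDigitsOf : List Int → Int → List Nat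
  | [], _ => []
  | x :: xs, c => (PySem.Int.mod (x + c) 10).toNat :: pvDigitsOf xs (PySem.Int.floordiv (x + c) 10)

def pvCarryOf : List Int → Int → Int
  | [], c => c
  | x :: xs, c => pvCarryOf xs (PySem.Int.floordiv (x + c) 10)

lemma pv_foldA : ∀ (cs : List Int) (s : String) (c : Int),
    ((cs.foldl pvStepCol (s, c)).1).toList = s.toList ++ (pvDigitsOf cs c).map Nat.digitChar
    ∧ (cs.foldl pvStepCol (s, c)).2 = pvCarryOf cs c := by
  intro cs
  induction cs with
  | nil => intro s c; simp [pvDigitsOf, pvCarryOf]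
  | cons x xs ih =>
      intro s c
      simp only [List.foldl_cons, pvDigitsOf, pvCarryOf, List.map_cons]
      have hm0 : 0 ≤ PySem.Int.mod (x + c) 10 := PySem.Int.mod_nonneg _ (by omega)
      have hm1 : PySem.Int.mod (x + c) 10 < 10 := PySem.Int.mod_lt _ (by omega)
      obtain ⟨ih1, ih2⟩ := ih (s ++ PySem.Int.toStr (PySem.Int.mod (x + c) 10)) (PySem.Int.floordiv (x + c) 10)
      refine ⟨?_, ih2⟩
      rw [show xs.foldl pvStepCol (pvStepCol (s, c) x)
            = xs.foldl pvStepCol (s ++ PySem.Int.toStr (PySem.Int.mod (x + c) 10), PySem.Int.floordiv (x + c) 10) from rfl,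
        ih1, String.toList_append, pv_toStr_single _ hm0 hm1]
      simp

lemma pv_digitsOf_length : ∀ (cs : List Int) (c : Int), (pvDigitsOf cs c).length = cs.length := by
  intro cs
  induction cs with
  | nil => intro c; rfl
  | cons x xs ih => intro c; simp [pvDigitsOf, ih]

lemma pv_digitsOf_lt : ∀ (cs : List Int) (c : Int), ∀ d ∈ pvDigitsOf cs c, d < 10 := by
  intro cs
  induction cs with
  | nil => intro c d hd; simp [pvDigitsOf] at hd
  | cons x xs ih =>
      intro c d hd
      simp only [pvDigitsOf, List.mem_cons] at hd
      rcases hd with h | h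
      · have := PySem.Int.mod_lt (x + c) (show (0:Int) < 10 by omega)
        have := PySem.Int.mod_nonneg (x + c) (show (0:Int) < 10 by omega)
        omega
      · exact ih _ d h

-- sum of the column values, little-endian
def pvSum : List Int → Int
  | [] => 0
  | x :: xs => x + 10 * pvSum xs

lemma pv_val_carry : ∀ (cs : List Int) (c : Int),
    (pvVal (pvDigitsOf cs c) : Int) + pvCarryOf cs c * 10 ^ cs.length = pvSum cs + c := by
  intro cs
  induction cs with
  | nil => intro c; simp [pvDigitsOf, pvCarryOf, pvVal, pvSum]
  | cons x xs ih =>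
      intro c
      have hdm := PySem.Int.floordiv_mul_add_mod (x + c) 10
      have hm0 : 0 ≤ PySem.Int.mod (x + c) 10 := PySem.Int.mod_nonneg _ (by omega)
      have hih := ih (PySem.Int.floordiv (x + c) 10)
      simp only [pvDigitsOf, pvCarryOf, pvVal, pvSum, List.length_cons]
      push_cast [Int.toNat_of_nonneg hm0]
      rw [pow_succ]
      nlinarith [hih]

lemma pv_carry_bound : ∀ (cs : List Int) (c : Int), 0 ≤ c → c ≤ 1 → (∀ x ∈ cs, 0 ≤ x ∧ x ≤ 18) →
    0 ≤ pvCarryOf cs c ∧ pvCarryOf cs c ≤ 1 := by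
  intro cs
  induction cs with
  | nil => intro c h0 h1 _; exact ⟨h0, h1⟩
  | cons x xs ih =>
      intro c h0 h1 hx
      obtain ⟨hx0, hx18⟩ := hx x (by simp)
      have hq : 0 ≤ PySem.Int.floordiv (x + c) 10 ∧ PySem.Int.floordiv (x + c) 10 ≤ 1 := by
        rw [PySem.Int.floordiv_eq_ediv_of_pos (by omega)]
        omega
      exact ih _ hq.1 hq.2 (fun y hy => hx y (by simp [hy]))

-- little-endian value of the characters read through pvDigit
def pvValD : List Char → Int
  | [] => 0
  | c :: cs => pvDigit c + 10 * pvValD cs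

lemma pvValD_append (t : List Char) (e : Char) : pvValD (t ++ [e]) = pvValD t + pvDigit e * 10 ^ t.length := by
  induction t with
  | nil => simp [pvValD]
  | cons d t ih => simp [pvValD, ih, pow_succ]; ring

-- the column sums of A's zip total 11 times the little-endian value
lemma pv_colsum : ∀ (r : List Char) (p : Char),
    pvSum ((List.zip (r ++ ['0']) (p :: r)).map (fun q => pvDigit q.1 + pvDigit q.2))
      = 11 * pvValD r + pvDigit p := by
  intro r
  induction r with
  | nil =>
      intro p
      have h0 : pvDigit '0' = 0 := by decide
      simp [pvSum, pvValD, h0]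
  | cons a r ih =>
      intro p
      simp only [List.cons_append, List.zip_cons_cons, List.map_cons, pvSum, pvValD, ih a]
      ring

-- B's left-to-right fold computes the little-endian value of the reversed character list
lemma pv_foldB : ∀ (l : List Char) (acc : Int),
    l.foldl (fun acc c => acc * 10 + pvDigit c) acc = acc * 10 ^ l.length + pvValD l.reverse := by
  intro l
  induction l with
  | nil => intro acc; simp [pvValD]
  | cons x l ih =>
      intro acc
      simp only [List.foldl_cons, ih, List.reverse_cons, pvValD_append, List.length_cons,
        List.length_reverse, pow_succ]
      ring

lemma pv_valD_nonneg : ∀ (l : List Char), (∀ c ∈ l, c.isDigit = true) → 0 ≤ pvValD l := by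
  intro l
  induction l with
  | nil => intro _; simp [pvValD]
  | cons c l ih =>
      intro h
      have h1 := (pv_digit_bounds c (h c (by simp))).1
      have h2 := ih (fun x hx => h x (by simp [hx]))
      simp only [pvValD]
      omega

-- ===== VERDICT (by name: the statement is the Claim_ definition above) =====
theorem multiply_by_11_spec : Claim_equal_multiply_by_11 := by
  intro n _ hpre
  unfold Spec_multiply_by_11 multiply_by_11 multiply_by_11_alt
  simp only [PySem.Str.slice?_none_none_neg_one, Option.getD_some, String.toList_ofList]
  rw [pvStepA_eq_col, ← List.foldl_map]
  set r : List Char := n.toList.reverse with hr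
  set cols : List Int := (List.zip (r ++ ['0']) ('0' :: r)).map
    (fun p => pvDigit p.1 + pvDigit p.2) with hcols
  obtain ⟨hA1, hA2⟩ := pv_foldA cols "" 0
  have hdig : ∀ c ∈ n.toList, c.isDigit = true := by
    intro c hc
    exact List.all_eq_true.mp hpre c hc
  have hdigr : ∀ c ∈ r, c.isDigit = true := fun c hc => hdig c (List.mem_reverse.mp hc)
  have hcolb : ∀ x ∈ cols, 0 ≤ x ∧ x ≤ 18 := by
    intro x hx
    rw [hcols] at hx
    obtain ⟨p, hp, hpx⟩ := List.mem_map.mp hx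
    obtain ⟨hp1, hp2⟩ := List.of_mem_zip hp
    have h1 : p.1.isDigit = true := by
      rcases List.mem_append.mp hp1 with h | h
      · exact hdigr _ h
      · simp only [List.mem_singleton] at h; rw [h]; decide
    have h2 : p.2.isDigit = true := by
      rcases List.mem_cons.mp hp2 with h | h
      · rw [h]; decide
      · exact hdigr _ h
    obtain ⟨a1, a2⟩ := pv_digit_bounds _ h1
    obtain ⟨b1, b2⟩ := pv_digit_bounds _ h2
    rw [← hpx]
    omega
  have hk := pv_carry_bound cols 0 (by omega) (by omega) hcolb
  have hval := pv_val_carry cols 0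
  have hsum : pvSum cols = 11 * pvValD r := by
    rw [hcols, pv_colsum r '0', show pvDigit '0' = 0 from by decide]; ring
  have hv0 : 0 ≤ pvValD r := pv_valD_nonneg r hdigr
  have hlcols : cols.length = n.toList.length + 1 := by
    rw [hcols]; simp [hr]
  set ds := pvDigitsOf cols 0 with hds
  have hdsl : ds.length = n.toList.length + 1 := by rw [hds, pv_digitsOf_length, hlcols]
  have hdslt : ∀ d ∈ ds, d < 10 := pv_digitsOf_lt cols 0
  have hdsne : ds ≠ [] := by
    intro h; rw [h] at hdsl; simp at hdsl
  -- B's fold computes 11 * (value of n)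
  rw [pv_foldB n.toList 0]
  simp only [zero_mul, zero_add, ← hr]
  set M : Nat := (11 * pvValD r).toNat with hM
  have hMc : 11 * pvValD r = (M : Int) := by rw [hM, Int.toNat_of_nonneg (by omega)]
  rw [hMc, pv_toStr_eq_render M]
  -- the value equation
  have hveq : (pvVal ds : Int) + pvCarryOf cols 0 * 10 ^ (n.toList.length + 1) = (M : Int) := by
    rw [← hMc, ← hsum]
    rw [hlcols] at hval
    linarith [hval]
  apply congrArg String.ofList
  by_cases hkz : pvCarryOf cols 0 = 0
  · -- no final carry
    have hifn : ¬ ((cols.foldl pvStepCol ("", 0)).2 ≠ 0) := by rw [hA2, hkz]; simp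
    rw [if_neg hifn]
    have hMv : pvVal ds = M := by
      rw [hkz] at hveq
      simp at hveq
      exact_mod_cast hveq
    rw [hA1]
    simp only [show ("" : String).toList = ([] : List Char) from rfl, List.nil_append]
    rw [pv_render_pad ds hdslt hdsne, hMv, hdsl]
  · -- final carry 1: the rendering of M has n.toList.length + 2 digits
    have hk1 : pvCarryOf cols 0 = 1 := by omega
    have hif : (cols.foldl pvStepCol ("", 0)).2 ≠ 0 := by rw [hA2, hk1]; omega
    rw [if_pos hif]
    have hMv : pvVal (ds ++ [1]) = M := by
      have := pvVal_append ds 1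
      rw [hk1] at hveq
      have h10 : ((10:Nat) ^ (n.toList.length + 1) : Int) = (10:Int) ^ (n.toList.length + 1) := by
        push_cast; ring
      have : (pvVal (ds ++ [1]) : Int) = (M : Int) := by
        rw [this]
        push_cast
        rw [hdsl] at *
        omega
      exact_mod_cast this
    have hpad := pv_render_pad (ds ++ [1]) (by
        intro d hd
        rcases List.mem_append.mp hd with h | h
        · exact hdslt d h
        · simp only [List.mem_singleton] at h; omega) (by simp)
    rw [hMv] at hpad
    have hlen1 : (ds ++ [1]).length = n.toList.length + 2 := by simp [hdsl]
    have hchars : ((cols.foldl pvStepCol ("", 0)).1 ++ "1").toList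
        = ((ds ++ [1]).map Nat.digitChar) := by
      rw [String.toList_append, hA1]
      simp [show Nat.digitChar 1 = '1' from rfl]
    -- the pad in hpad is empty: the reversed digit list starts with '1', not '0'
    have hrev1 : ((ds ++ [1]).map Nat.digitChar).reverse
        = '1' :: (ds.map Nat.digitChar).reverse := by
      simp [show Nat.digitChar 1 = '1' from rfl]
    have hpad0 : (ds ++ [1]).length - (pvRender M).length = 0 := by
      rcases h : (ds ++ [1]).length - (pvRender M).length with _ | j
      · exact h
      · exfalso
        rw [h, List.replicate_succ] at hpad
        rw [hrev1] at hpad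
        exact absurd (List.head_eq_of_cons_eq hpad) (by decide)
    have hRge : n.toList.length + 2 ≤ (pvRender M).length := by
      rw [hlen1] at hpad0; omega
    rw [hchars, hpad, hpad0]
    simp only [List.replicate_zero, List.nil_append]
    rw [show n.toList.length + 1 - (pvRender M).length = 0 from by omega]
    simp
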